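-- pv_equiv track=rewrite | github.com/VasuJha/Python-files | Squarefunction.py | last_vowel
-- ===== SOURCE A (Python) =====
-- def last_vowel(word):
--         """ (str) -> str
--
--         Return the last vowel in a word.
--
--         >>> last_vowel('hello')
--         'o'
--         >>> last_vowel('xyaz')
--         'a'
--         """
--         i = len(word) - 1
--         while i >= 0:
--                 if word[i] in 'aeiouAEIOU':
--                         return word[i]
--                 else:
--                         i = i - 1
--         return 'None'
-- ===== SOURCE B (Python) =====
-- def last_vowel(word):
--     vowels = [c for c in word if c in 'aeiouAEIOU']
--     return vowels[-1] if vowels else 'None'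
-- ===== Notes on version B (the rewrite author's own statement) =====
-- stated objective: simpler
-- what changed: Replaces the backward index loop with early return by a single forward pass collecting all vowels and indexing the last one.
import Mathlib
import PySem

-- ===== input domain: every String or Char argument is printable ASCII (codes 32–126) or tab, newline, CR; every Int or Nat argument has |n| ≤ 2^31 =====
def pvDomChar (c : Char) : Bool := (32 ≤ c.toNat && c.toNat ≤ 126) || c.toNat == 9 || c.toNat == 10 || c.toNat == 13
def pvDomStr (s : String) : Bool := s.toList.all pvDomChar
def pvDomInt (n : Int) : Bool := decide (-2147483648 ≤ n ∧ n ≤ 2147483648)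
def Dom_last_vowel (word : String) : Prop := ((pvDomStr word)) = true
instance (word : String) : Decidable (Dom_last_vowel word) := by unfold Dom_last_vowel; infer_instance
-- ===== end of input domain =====

-- B replaces A's backward scan with early return by one forward pass collecting the vowels
-- and taking the last one: simpler decomposition, same O(n) cost.

-- ===== PORT A =====
-- backward while-loop: i from len-1 down to 0, return word[i] on the first vowel
-- (index i is always in range here, so getD never uses its default)
def last_vowel_loop (cs : List Char) : Nat → String
  | 0 =>
      if ("aeiouAEIOU".toList).contains (cs.getD 0 ' ') then String.ofList [cs.getD 0 ' ']
      else "None"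
  | i+1 =>
      if ("aeiouAEIOU".toList).contains (cs.getD (i+1) ' ') then String.ofList [cs.getD (i+1) ' ']
      else last_vowel_loop cs i

def last_vowel (word : String) : String :=
  let cs := word.toList
  match cs.length with
  | 0 => "None"          -- i = -1, loop body never runs
  | n+1 => last_vowel_loop cs n

-- ===== PORT B =====
-- vowels = [c for c in word if c in 'aeiouAEIOU']; return vowels[-1] if vowels else 'None'
def last_vowel_alt (word : String) : String :=
  let vs := word.toList.filter (fun c => ("aeiouAEIOU".toList).contains c)
  if vs.isEmpty then "None"
  else
    match PySem.List.pyGet? vs (-1) with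
    | some c => String.ofList [c]
    | none => "None"     -- unreachable: vs nonempty

-- ===== PRECONDITION & SPEC =====
def Spec_last_vowel (word : String) (out : String) : Prop := out = last_vowel_alt word
instance (word : String) (out : String) : Decidable (Spec_last_vowel word out) := by unfold Spec_last_vowel; infer_instance

-- ===== CLAIM (what is proved, stated in full; the proofs are below) =====
def Claim_equal_last_vowel : Prop := ∀ (word : String), Dom_last_vowel word → Spec_last_vowel word (last_vowel word)

-- ===== LEMMAS AND PROOFS =====
theorem last_vowel_loop_eq (cs : List Char) (i : Nat) (h : i < cs.length) :
    last_vowel_loop cs i =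
      match ((cs.take (i+1)).filter (fun c => ("aeiouAEIOU".toList).contains c)).getLast? with
      | some c => String.ofList [c]
      | none => "None" := by
  induction i with
  | zero =>
      obtain ⟨c, cs', rfl⟩ : ∃ c cs', cs = c :: cs' := by
        cases cs with
        | nil => simp at h
        | cons a l => exact ⟨a, l, rfl⟩
      simp only [last_vowel_loop, List.getD_cons_zero, List.take_succ_cons,
        List.take_zero, List.filter_cons, List.filter_nil]
      cases hv : ("aeiouAEIOU".toList).contains c
      · simp only [Bool.false_eq_true, if_false, List.getLast?_nil]
      · simp only [if_true, List.getLast?_singleton]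
  | succ j ih =>
      have hj : j < cs.length := Nat.lt_of_succ_lt h
      have hget : cs.getD (j+1) ' ' = cs[j+1] := by
        simp [List.getD, List.getElem?_eq_getElem h]
      have htake : cs.take (j+1+1) = cs.take (j+1) ++ [cs[j+1]] := by
        rw [List.take_add_one]
        simp [List.getElem?_eq_getElem h]
      simp only [last_vowel_loop, hget, htake, List.filter_append, List.filter_cons,
        List.filter_nil]
      cases hv : ("aeiouAEIOU".toList).contains cs[j+1]
      · simp only [Bool.false_eq_true, if_false, List.append_nil]
        exact ih hj
      · simp only [if_true, List.getLast?_concat]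

-- ===== VERDICT (by name: the statement is the Claim_ definition above) =====
theorem last_vowel_spec : Claim_equal_last_vowel := by
  intro word _
  unfold Spec_last_vowel last_vowel last_vowel_alt
  simp only []
  cases hlen : word.toList.length with
  | zero =>
      have : word.toList = [] := List.eq_nil_of_length_eq_zero hlen
      simp [this]
  | succ n =>
      have hn : n < word.toList.length := by omega
      have htake : word.toList.take (n+1) = word.toList := by
        rw [← hlen]; exact List.take_length
      show last_vowel_loop word.toList n = _
      rw [last_vowel_loop_eq _ n hn, htake]
      rw [PySem.List.pyGet?_neg_one]
      cases hlast : (word.toList.filter (fun c => ("aeiouAEIOU".toList).contains c)).getLast? with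
      | none =>
          rw [List.getLast?_eq_none_iff.mp hlast]
          simp only [List.isEmpty_nil, if_true, List.getLast?_nil]
      | some c =>
          have hne : (word.toList.filter (fun c => ("aeiouAEIOU".toList).contains c)) ≠ [] := by
            intro he; rw [he] at hlast; simp at hlast
          have hie : (word.toList.filter (fun c => ("aeiouAEIOU".toList).contains c)).isEmpty = false :=
            List.isEmpty_eq_false_iff.mpr hne
          rw [hie]
          simp only [Bool.false_eq_true, if_false]
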